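-- pv_equiv track=rewrite | github.com/808NEMESIS/Warmr | spintax_engine.py | _split_at_pipe
-- ===== SOURCE A (Python) =====
-- def _split_at_pipe(content: str) -> list[str]:
--     """
--     Split content by '|' only at brace-nesting depth 0.
--
--     Handles nested braces correctly: {Hey {there|friend}|Hi} splits into
--     ["Hey {there|friend}", "Hi"], not ["Hey {there", "friend}", "Hi"].
--     """
--     options: list[str] = []
--     depth = 0
--     current: list[str] = []
--
--     for char in content:
--         if char == "{":
--             depth += 1
--             current.append(char)
--         elif char == "}":
--             depth -= 1
--             current.append(char)
--         elif char == "|" and depth == 0: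
--             options.append("".join(current))
--             current = []
--         else:
--             current.append(char)
--
--     options.append("".join(current))
--     return options
-- ===== SOURCE B (Python) =====
-- def _split_at_pipe(content: str) -> list[str]:
--     # Two passes: record indices of top-level '|', then slice between boundaries.
--     cuts: list[int] = []
--     depth = 0
--     for i, ch in enumerate(content):
--         if ch == "{":
--             depth += 1
--         elif ch == "}":
--             depth -= 1
--         elif ch == "|" and depth == 0:
--             cuts.append(i)
--     out: list[str] = []
--     prev = -1
--     for cut in cuts:
--         out.append(content[prev + 1:cut])
--         prev = cut
--     out.append(content[prev + 1:])
--     return out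
-- ===== Notes on version B (the rewrite author's own statement) =====
-- stated objective: alternative
-- what changed: Replaces A's single pass that accumulates a character buffer per segment with two passes: one scan recording the indices of the top-level pipe separators into a cut table, then a slicing pass that builds each segment from the substring between consecutive boundaries.
import Mathlib
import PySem

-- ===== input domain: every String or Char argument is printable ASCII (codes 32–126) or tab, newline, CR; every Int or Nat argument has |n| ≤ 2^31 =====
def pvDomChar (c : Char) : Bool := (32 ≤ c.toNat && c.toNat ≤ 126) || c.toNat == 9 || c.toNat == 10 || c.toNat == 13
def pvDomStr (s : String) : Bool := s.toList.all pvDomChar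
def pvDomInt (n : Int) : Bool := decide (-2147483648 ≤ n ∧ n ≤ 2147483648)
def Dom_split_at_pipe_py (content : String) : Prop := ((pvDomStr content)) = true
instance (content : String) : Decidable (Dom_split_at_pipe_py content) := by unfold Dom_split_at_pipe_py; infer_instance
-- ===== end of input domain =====

-- B replaces A's char-by-char buffer accumulation by an index table of top-level '|' positions
-- plus a slicing pass (objective: alternative decomposition, same O(n) cost).

-- ===== PORT A =====
-- state = (options, depth, current); current is the list of chars, "".join = String.ofList at append time
def splitAStep (st : List String × Int × List Char) (c : Char) : List String × Int × List Char :=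
  if c = '{' then (st.1, st.2.1 + 1, st.2.2 ++ [c])
  else if c = '}' then (st.1, st.2.1 - 1, st.2.2 ++ [c])
  else if c = '|' ∧ st.2.1 = 0 then (st.1 ++ [String.ofList st.2.2], st.2.1, [])
  else (st.1, st.2.1, st.2.2 ++ [c])

def split_at_pipe_py (content : String) : List String :=
  let st := content.toList.foldl splitAStep ([], 0, [])
  st.1 ++ [String.ofList st.2.2]

-- ===== PORT B =====
-- first pass: indices of '|' at depth 0 (the for-i,ch-loop of Source B as structural recursion)
def splitCuts : List Char → Int → Int → List Int
  | [], _, _ => []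
  | c :: r, i, d =>
    if c = '{' then splitCuts r (i + 1) (d + 1)
    else if c = '}' then splitCuts r (i + 1) (d - 1)
    else if c = '|' ∧ d = 0 then i :: splitCuts r (i + 1) d
    else splitCuts r (i + 1) d

-- second pass: out.append(content[prev+1:cut]) walking the cut table, then content[prev+1:]
def splitSlices (cl : List Char) : List Int → Int → List String
  | [], prev => [String.ofList (PySem.List.slice cl (some (prev + 1)) none)]
  | cut :: cs, prev =>
      String.ofList (PySem.List.slice cl (some (prev + 1)) (some cut)) :: splitSlices cl cs cut

def split_at_pipe_py_alt (content : String) : List String :=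
  splitSlices content.toList (splitCuts content.toList 0 0) (-1)

-- ===== PRECONDITION & SPEC =====
def Spec_split_at_pipe_py (content : String) (out : List String) : Prop := out = split_at_pipe_py_alt content
instance (content : String) (out : List String) : Decidable (Spec_split_at_pipe_py content out) := by unfold Spec_split_at_pipe_py; infer_instance

-- ===== CLAIM (what is proved, stated in full; the proofs are below) =====
def Claim_equal_split_at_pipe_py : Prop := ∀ (content : String), Dom_split_at_pipe_py content → Spec_split_at_pipe_py content (split_at_pipe_py content)

-- ===== LEMMAS AND PROOFS =====

-- prepend a pending char-buffer onto the first produced segment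
def prependFirst (cur : List Char) : List String → List String
  | [] => [String.ofList cur]
  | s :: t => String.ofList (cur ++ s.toList) :: t

theorem splitCuts_ge (l : List Char) : ∀ (i d x : Int), x ∈ splitCuts l i d → i ≤ x := by
  induction l with
  | nil => intro i d x h; simp [splitCuts] at h
  | cons c r ih =>
    intro i d x h
    unfold splitCuts at h
    split_ifs at h with h1 h2 h3
    · have := ih (i + 1) (d + 1) x h; omega
    · have := ih (i + 1) (d - 1) x h; omega
    · rcases List.mem_cons.mp h with h | h
      · omega
      · have := ih (i + 1) d x h; omega
    · have := ih (i + 1) d x h; omega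

theorem slice_cons_some {cl r : List Char} {c : Char} {i X : Int} (h0 : 0 ≤ i)
    (hd : cl.drop i.toNat = c :: r) (hX : i + 1 ≤ X) :
    PySem.List.slice cl (some i) (some X) = c :: PySem.List.slice cl (some (i + 1)) (some X) := by
  have h0X : 0 ≤ X := by omega
  rw [PySem.List.slice_toNat cl h0 h0X, PySem.List.slice_toNat cl (by omega) h0X]
  have hdrop1 : cl.drop (i + 1).toNat = r := by
    have h1 : (i + 1).toNat = i.toNat + 1 := by omega
    rw [h1, ← List.drop_drop, hd]; rfl
  rw [hd, hdrop1]
  have : X.toNat - i.toNat = (X.toNat - (i + 1).toNat) + 1 := by omega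
  rw [this, List.take_succ_cons]

theorem slice_cons_none {cl r : List Char} {c : Char} {i : Int} (h0 : 0 ≤ i)
    (hd : cl.drop i.toNat = c :: r) :
    PySem.List.slice cl (some i) none = c :: PySem.List.slice cl (some (i + 1)) none := by
  rw [PySem.List.slice_from cl h0, PySem.List.slice_from cl (by omega)]
  have hdrop1 : cl.drop (i + 1).toNat = r := by
    have h1 : (i + 1).toNat = i.toNat + 1 := by omega
    rw [h1, ← List.drop_drop, hd]; rfl
  rw [hd, hdrop1]

theorem slice_self_nil (cl : List Char) {i : Int} (h0 : 0 ≤ i) :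
    PySem.List.slice cl (some i) (some i) = [] := by
  rw [PySem.List.slice_toNat cl h0 h0]; simp

-- stepping the prev-boundary past content[i] = c prepends c to the first segment
theorem prependFirst_step {cl r : List Char} {c : Char} {i : Int} (cur : List Char)
    (h0 : 0 ≤ i) (hd : cl.drop i.toNat = c :: r)
    (cs : List Int) (hcs : ∀ x ∈ cs, i + 1 ≤ x) :
    prependFirst cur (splitSlices cl cs (i - 1)) =
      prependFirst (cur ++ [c]) (splitSlices cl cs i) := by
  cases cs with
  | nil =>
    simp only [splitSlices, prependFirst, String.toList_ofList]
    rw [show i - 1 + 1 = i by ring, slice_cons_none h0 hd]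
    simp
  | cons cut cs' =>
    have hcut : i + 1 ≤ cut := hcs cut (List.mem_cons_self ..)
    simp only [splitSlices, prependFirst, String.toList_ofList]
    rw [show i - 1 + 1 = i by ring, slice_cons_some h0 hd hcut]
    simp

theorem prependFirst_nil (cl : List Char) (cs : List Int) (p : Int) :
    prependFirst [] (splitSlices cl cs p) = splitSlices cl cs p := by
  cases cs <;> simp [splitSlices, prependFirst]

-- the main loop invariant: A's fold from any state equals opts ++ B's slices with cur pending
theorem main_inv (cl : List Char) (l : List Char) :
    ∀ (i : Int) (d : Int) (cur : List Char) (opts : List String),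
      0 ≤ i → cl.drop i.toNat = l →
      (let f := l.foldl splitAStep (opts, d, cur); f.1 ++ [String.ofList f.2.2]) =
        opts ++ prependFirst cur (splitSlices cl (splitCuts l i d) (i - 1)) := by
  induction l with
  | nil =>
    intro i d cur opts h0 hd
    simp only [List.foldl_nil, splitCuts, splitSlices, prependFirst, String.toList_ofList]
    rw [show i - 1 + 1 = i by ring, PySem.List.slice_from cl h0, hd]
    simp
  | cons c r ih =>
    intro i d cur opts h0 hd
    have hdrop1 : cl.drop (i + 1).toNat = r := by
      have h1 : (i + 1).toNat = i.toNat + 1 := by omega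
      rw [h1, ← List.drop_drop, hd]; rfl
    simp only [List.foldl_cons, splitAStep, splitCuts]
    split_ifs with h1 h2 h3
    · rw [ih (i + 1) (d + 1) (cur ++ [c]) opts (by omega) hdrop1,
        show i + 1 - 1 = i by ring,
        ← prependFirst_step cur h0 hd _ (splitCuts_ge r (i + 1) (d + 1))]
    · rw [ih (i + 1) (d - 1) (cur ++ [c]) opts (by omega) hdrop1,
        show i + 1 - 1 = i by ring,
        ← prependFirst_step cur h0 hd _ (splitCuts_ge r (i + 1) (d - 1))]
    · rw [ih (i + 1) d [] (opts ++ [String.ofList cur]) (by omega) hdrop1,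
        show i + 1 - 1 = i by ring, prependFirst_nil]
      simp only [splitSlices, prependFirst, String.toList_ofList]
      rw [show i - 1 + 1 = i by ring, slice_self_nil cl h0]
      simp
    · rw [ih (i + 1) d (cur ++ [c]) opts (by omega) hdrop1,
        show i + 1 - 1 = i by ring,
        ← prependFirst_step cur h0 hd _ (splitCuts_ge r (i + 1) d)]

-- ===== VERDICT (by name: the statement is the Claim_ definition above) =====
theorem split_at_pipe_py_spec : Claim_equal_split_at_pipe_py := by
  intro content _
  unfold Spec_split_at_pipe_py split_at_pipe_py split_at_pipe_py_alt
  rw [main_inv content.toList content.toList 0 0 [] [] (by omega) (by simp)]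
  rw [show (0 : Int) - 1 = -1 by ring, prependFirst_nil]
  simp
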